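-- pv_equiv track=rewrite | github.com/tuonglab/minigene_design | scripts/_utils.py | get_gene_info
-- ===== SOURCE A (Python) =====
-- def get_gene_info(attributes: str) -> tuple[str, str, str, str]:
--     """
--     Parses the attributes field in the GTF file to extract gene information.
--
--     Parameters
--     ----------
--     attributes : str
--         String containing attributes from the GTF file.
--
--     Returns
--     -------
--     tuple[str, str, str, str]
--         A tuple containing gene_id, gene_name, gene_type, and protein_id.
--     """
--     # Parse the attributes field in the GTF file to get the gene_id and gene_name
--     attributes = attributes.split(";")
--     gene_id, gene_name, gene_type, protein_id = None, None, None, None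
--     for attribute in attributes:
--         if attribute != "":
--             key, value = attribute.strip().split(" ")
--             if key == "gene_type":
--                 gene_type = value.strip('"')
--             if key == "gene_id":
--                 gene_id = value.strip('"')
--             if key == "gene_name":
--                 gene_name = value.strip('"')
--             if key == "protein_id":
--                 protein_id = value.strip('"')
--     return gene_id, gene_name, gene_type, protein_id
-- ===== SOURCE B (Python) =====
-- def get_gene_info(attributes: str) -> tuple[str, str, str, str]:
--     # Stage 1: parse every non-empty semicolon piece once into a (key, value) pair
--     # (the two-value unpack raises ValueError on malformed pieces, like A).
--     pairs = []
--     for piece in attributes.split(";"):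
--         if piece != "":
--             key, value = piece.strip().split(" ")
--             pairs.append((key, value))
--
--     # Stage 2: per requested key, a backwards search — the first match scanning
--     # from the end is the last occurrence ("last assignment wins").
--     def last(key):
--         for k, v in reversed(pairs):
--             if k == key:
--                 return v.strip('"')
--         return None
--
--     return last("gene_id"), last("gene_name"), last("gene_type"), last("protein_id")
-- ===== Notes on version B (the rewrite author's own statement) =====
-- stated objective: alternative
-- what changed: Replaces A's single accumulator pass with four hard-coded branches by a parse stage building (key, value) pairs followed by, per requested key, a backwards search whose first match from the end is the last occurrence, so no accumulator state is carried.
import Mathlib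
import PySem

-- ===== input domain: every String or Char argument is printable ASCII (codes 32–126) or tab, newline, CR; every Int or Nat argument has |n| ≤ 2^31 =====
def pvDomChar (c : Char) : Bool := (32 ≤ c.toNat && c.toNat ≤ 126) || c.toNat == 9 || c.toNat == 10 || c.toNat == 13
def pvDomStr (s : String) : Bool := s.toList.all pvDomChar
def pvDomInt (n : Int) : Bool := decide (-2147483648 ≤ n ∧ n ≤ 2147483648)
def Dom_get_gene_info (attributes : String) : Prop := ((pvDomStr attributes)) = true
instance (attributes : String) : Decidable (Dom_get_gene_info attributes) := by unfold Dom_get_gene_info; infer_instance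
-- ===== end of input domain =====

-- B replaces A's accumulator pass (four if-branches updating state) by a parse stage plus a
-- per-key backwards search (first match from the end = last assignment); return value only.

-- ===== PORT A =====
def get_gene_info (attributes : String) : Option String × Option String × Option String × Option String :=
  let pieces := PySem.Chars.splitOn attributes.toList [';']
  pieces.foldl (fun st attrib =>
    if attrib ≠ [] then
      match PySem.Chars.splitOn (PySem.Chars.strip attrib) [' '] with
      | [key, value] =>
        let gene_type := if key = "gene_type".toList then some (String.ofList (PySem.Chars.stripChars value ['"'])) else st.2.2.1
        let gene_id := if key = "gene_id".toList then some (String.ofList (PySem.Chars.stripChars value ['"'])) else st.1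
        let gene_name := if key = "gene_name".toList then some (String.ofList (PySem.Chars.stripChars value ['"'])) else st.2.1
        let protein_id := if key = "protein_id".toList then some (String.ofList (PySem.Chars.stripChars value ['"'])) else st.2.2.2
        (gene_id, gene_name, gene_type, protein_id)
      | _ => st          -- Python raises ValueError here; excluded by Pre_
    else st) (none, none, none, none)

-- ===== PORT B =====
-- Python B's `last` helper: scan the parsed (key, value) pairs from the end, return the first match.
def pvLast (pairs : List (List Char × List Char)) (key : List Char) : Option String :=
  match pairs.reverse.find? (fun kv => kv.1 == key) with
  | some kv => some (String.ofList (PySem.Chars.stripChars kv.2 ['"']))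
  | none => none

def get_gene_info_alt (attributes : String) : Option String × Option String × Option String × Option String :=
  -- stage 1: parse each non-empty piece once into a (key, value) pair
  let pairs := (PySem.Chars.splitOn attributes.toList [';']).foldl (fun acc piece =>
    if piece ≠ [] then
      let parts := PySem.Chars.splitOn (PySem.Chars.strip piece) [' ']
      if hp : parts.length = 2 then
        -- key, value = parts (the two-value unpack)
        acc ++ [(parts[0], parts[1])]
      else acc       -- Python raises ValueError here; excluded by Pre_
    else acc) []
  -- stage 2: four backwards searches
  (pvLast pairs "gene_id".toList, pvLast pairs "gene_name".toList,
   pvLast pairs "gene_type".toList, pvLast pairs "protein_id".toList)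

-- ===== PRECONDITION & SPEC =====
-- Pre_ excludes exactly the inputs where A (and B identically) raises ValueError: some
-- nonempty ';'-piece does not strip-and-split into exactly two space-separated fields.
def Pre_get_gene_info (attributes : String) : Prop :=
  ∀ p ∈ PySem.Chars.splitOn attributes.toList [';'], p ≠ [] →
    (PySem.Chars.splitOn (PySem.Chars.strip p) [' ']).length = 2
instance (attributes : String) : Decidable (Pre_get_gene_info attributes) := by
  unfold Pre_get_gene_info; infer_instance

def pvWitness_get_gene_info : String := "gene_id \"G1\"; gene_name \"N1\"; gene_type \"pc\""

def Spec_get_gene_info (attributes : String) (out : Option String × Option String × Option String × Option String) : Prop := out = get_gene_info_alt attributes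
instance (attributes : String) (out : Option String × Option String × Option String × Option String) : Decidable (Spec_get_gene_info attributes out) := by unfold Spec_get_gene_info; infer_instance

-- ===== CLAIM (what is proved, stated in full; the proofs are below) =====
def Claim_equal_get_gene_info : Prop := ∀ (attributes : String), Dom_get_gene_info attributes → Pre_get_gene_info attributes → Spec_get_gene_info attributes (get_gene_info attributes)

-- ===== LEMMAS AND PROOFS =====

-- A's loop body, named for the proofs (definitionally the lambda in port A)
def pvStepA (st : Option String × Option String × Option String × Option String) (attrib : List Char) :
    Option String × Option String × Option String × Option String :=
  if attrib ≠ [] then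
    match PySem.Chars.splitOn (PySem.Chars.strip attrib) [' '] with
    | [key, value] =>
      let gene_type := if key = "gene_type".toList then some (String.ofList (PySem.Chars.stripChars value ['"'])) else st.2.2.1
      let gene_id := if key = "gene_id".toList then some (String.ofList (PySem.Chars.stripChars value ['"'])) else st.1
      let gene_name := if key = "gene_name".toList then some (String.ofList (PySem.Chars.stripChars value ['"'])) else st.2.1
      let protein_id := if key = "protein_id".toList then some (String.ofList (PySem.Chars.stripChars value ['"'])) else st.2.2.2
      (gene_id, gene_name, gene_type, protein_id)
    | _ => st
  else st

-- the pairs contributed by one piece (so B's foldl is an 'acc ++ g x' loop)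
def pvKV (p : List Char) : List (List Char × List Char) :=
  if p ≠ [] then
    let parts := PySem.Chars.splitOn (PySem.Chars.strip p) [' ']
    if hp : parts.length = 2 then [(parts[0], parts[1])] else []
  else []

lemma pvPairs_flatMap (pieces : List (List Char)) (acc : List (List Char × List Char)) :
    pieces.foldl (fun acc piece =>
      if piece ≠ [] then
        let parts := PySem.Chars.splitOn (PySem.Chars.strip piece) [' ']
        if hp : parts.length = 2 then acc ++ [(parts[0], parts[1])] else acc
      else acc) acc = acc ++ pieces.flatMap pvKV := by
  have hbody : (fun (acc : List (List Char × List Char)) piece =>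
      if piece ≠ [] then
        let parts := PySem.Chars.splitOn (PySem.Chars.strip piece) [' ']
        if hp : parts.length = 2 then acc ++ [(parts[0], parts[1])] else acc
      else acc) = (fun acc x => acc ++ pvKV x) := by
    funext acc p
    unfold pvKV
    by_cases hp : p = []
    · simp [hp]
    · simp only [hp, ne_eq, not_false_eq_true, if_pos]
      split_ifs <;> simp
  rw [hbody, PySem.List.foldl_append_eq_flatMap]

lemma pvLast_nil (key : List Char) : pvLast [] key = none := rfl

lemma pvLast_cons (k v : List Char) (rest : List (List Char × List Char)) (key : List Char) :
    pvLast ((k, v) :: rest) key =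
      (pvLast rest key).or
        (if k == key then some (String.ofList (PySem.Chars.stripChars v ['"'])) else none) := by
  unfold pvLast
  rw [List.reverse_cons, List.find?_append]
  cases h : List.find? (fun kv => kv.1 == key) rest.reverse with
  | some w => rfl
  | none =>
    by_cases hk : (k == key) = true <;> simp [List.find?, hk]

lemma pvFold_eq (pieces : List (List Char)) (st : Option String × Option String × Option String × Option String)
    (hp : ∀ p ∈ pieces, p ≠ [] → (PySem.Chars.splitOn (PySem.Chars.strip p) [' ']).length = 2) :
    pieces.foldl pvStepA st =
      ((pvLast (pieces.flatMap pvKV) "gene_id".toList).or st.1,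
       (pvLast (pieces.flatMap pvKV) "gene_name".toList).or st.2.1,
       (pvLast (pieces.flatMap pvKV) "gene_type".toList).or st.2.2.1,
       (pvLast (pieces.flatMap pvKV) "protein_id".toList).or st.2.2.2) := by
  induction pieces generalizing st with
  | nil => simp [pvLast_nil]
  | cons p rest ih =>
    have hrest : ∀ q ∈ rest, q ≠ [] → (PySem.Chars.splitOn (PySem.Chars.strip q) [' ']).length = 2 :=
      fun q hq => hp q (by simp [hq])
    rw [List.foldl_cons, ih _ hrest]
    by_cases hpe : p = []
    · simp [pvStepA, hpe, pvKV]
    · have hl : (PySem.Chars.splitOn (PySem.Chars.strip p) [' ']).length = 2 := hp p (by simp) hpe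
      obtain ⟨k, v, hkv⟩ : ∃ k v, PySem.Chars.splitOn (PySem.Chars.strip p) [' '] = [k, v] := by
        rcases h : PySem.Chars.splitOn (PySem.Chars.strip p) [' '] with _ | ⟨k, _ | ⟨v, _ | _⟩⟩ <;> simp_all
      have hflat : (p :: rest).flatMap pvKV = (k, v) :: rest.flatMap pvKV := by
        simp [List.flatMap_cons, pvKV, hpe, hkv, hl]
      have hstep : pvStepA st p =
          ((if k = "gene_id".toList then some (String.ofList (PySem.Chars.stripChars v ['"'])) else st.1),
           (if k = "gene_name".toList then some (String.ofList (PySem.Chars.stripChars v ['"'])) else st.2.1),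
           (if k = "gene_type".toList then some (String.ofList (PySem.Chars.stripChars v ['"'])) else st.2.2.1),
           (if k = "protein_id".toList then some (String.ofList (PySem.Chars.stripChars v ['"'])) else st.2.2.2)) := by
        unfold pvStepA
        simp [hpe, hkv]
      have hcomp : ∀ (key : List Char) (o : Option String),
          (pvLast ((k, v) :: rest.flatMap pvKV) key).or o =
          (pvLast (rest.flatMap pvKV) key).or
            (if k = key then some (String.ofList (PySem.Chars.stripChars v ['"'])) else o) := by
        intro key o
        rw [pvLast_cons, Option.or_assoc]
        congr 1
        by_cases hk : k = key <;> simp [hk]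
      rw [hflat, hstep]
      simp only [hcomp]

-- ===== VERDICT (by name: the statement is the Claim_ definition above) =====
theorem get_gene_info_spec : Claim_equal_get_gene_info := by
  intro attributes _ hpre
  show get_gene_info attributes = get_gene_info_alt attributes
  have h1 : get_gene_info attributes =
      (PySem.Chars.splitOn attributes.toList [';']).foldl pvStepA (none, none, none, none) := rfl
  have h2 : get_gene_info_alt attributes =
      (pvLast ((PySem.Chars.splitOn attributes.toList [';']).flatMap pvKV) "gene_id".toList,
       pvLast ((PySem.Chars.splitOn attributes.toList [';']).flatMap pvKV) "gene_name".toList,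
       pvLast ((PySem.Chars.splitOn attributes.toList [';']).flatMap pvKV) "gene_type".toList,
       pvLast ((PySem.Chars.splitOn attributes.toList [';']).flatMap pvKV) "protein_id".toList) := by
    unfold get_gene_info_alt
    rw [pvPairs_flatMap]
    simp
  rw [h1, h2, pvFold_eq _ _ hpre]
  simp
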